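-- pv_equiv track=rewrite | github.com/lachimex/WDI | do_kolokwium14.py | zadanie
-- ===== SOURCE A (Python) =====
-- def is_prime(n):
--     if n <= 1:
--         return False
--     for i in range(2, int(n**0.5)+1):
--         if n % i == 0:
--             return False
--     return True
--
-- def zadanie(t):
--     n = len(t)
--     greatest = 0
--     index_greatest = 0
--     for i in range(n):
--         iloczyn = 1
--         for j in range(i):
--             if is_prime(t[j]):
--                 iloczyn *= t[j]
--         if iloczyn == t[i]:
--             if t[i] > greatest:
--                 greatest = t[i]
--                 index_greatest = i
--     if index_greatest != 0:
--         return index_greatest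
--     else:
--         return None
-- ===== SOURCE B (Python) =====
-- def is_prime(n):
--     if n <= 1:
--         return False
--     d = 2
--     while d * d <= n:
--         if n % d == 0:
--             return False
--         d += 1
--     return True
--
--
-- def zadanie(t):
--     prod = 1          # running product of the primes seen so far (strictly before i)
--     greatest = 0
--     idx = 0
--     for i, v in enumerate(t):
--         if prod == v and v > greatest:
--             greatest = v
--             idx = i
--         if is_prime(v):
--             prod *= v
--     return idx if idx != 0 else None
-- ===== Notes on version B (the rewrite author's own statement) =====
-- stated objective: faster
-- what changed: Single pass that maintains the running product of the prefix primes instead of recomputing the product of all preceding primes from scratch for every index.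
import Mathlib
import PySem

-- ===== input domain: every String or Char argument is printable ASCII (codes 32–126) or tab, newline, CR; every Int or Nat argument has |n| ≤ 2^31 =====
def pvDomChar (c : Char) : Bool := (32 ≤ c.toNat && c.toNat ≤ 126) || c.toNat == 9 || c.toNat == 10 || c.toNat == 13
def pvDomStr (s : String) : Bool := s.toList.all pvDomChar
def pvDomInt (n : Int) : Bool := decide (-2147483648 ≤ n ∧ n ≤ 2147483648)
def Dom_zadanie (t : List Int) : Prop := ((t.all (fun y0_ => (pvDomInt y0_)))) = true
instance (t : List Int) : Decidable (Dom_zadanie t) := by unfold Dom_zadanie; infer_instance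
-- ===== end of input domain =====

-- B replaces A's nested loop (recomputing the product of all preceding primes for every
-- index) by a single pass maintaining the running product; timing run reported B faster.


-- ===== PORT A =====
-- is_prime from Source A.  int(n**0.5) is ported as Nat.sqrt n.toNat: exact for every
-- 2 ≤ n ≤ 2^31 (the Dom bound), where float sqrt never crosses an integer boundary.
def isPrimeA (n : Int) : Bool :=
  if n ≤ 1 then false
  else (PySem.List.pyRange 2 ((Nat.sqrt n.toNat : Int) + 1) 1).all
         (fun i => !(PySem.Int.mod n i == 0))

def zadanie (t : List Int) : Option Int :=
  let n : Int := t.length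
  let st := (PySem.List.pyRange 0 n 1).foldl (fun (st : Int × Int) i =>
    let iloczyn := (PySem.List.pyRange 0 i 1).foldl (fun p j =>
      if isPrimeA (PySem.List.pyGetD t j 0) then p * PySem.List.pyGetD t j 0 else p) 1
    let ti := PySem.List.pyGetD t i 0
    if iloczyn == ti then (if ti > st.1 then (ti, i) else st) else st) (0, 0)
  if st.2 ≠ 0 then some st.2 else none

-- ===== PORT B =====
-- Source B's while-loop trial division: d = 2; while d*d <= n: …
def trialB (n : Int) (d : Nat) : Bool :=
  if h : ((d : Int) * d ≤ n) then
    (if PySem.Int.mod n d == 0 then false else trialB n (d + 1))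
  else true
termination_by n.toNat + 1 - d
decreasing_by
  have hd : (d : Int) ≤ (d : Int) * d := by nlinarith [Int.natCast_nonneg d]
  have : (d : Int) ≤ n := le_trans hd h
  omega

def isPrimeB (n : Int) : Bool :=
  if n ≤ 1 then false else trialB n 2

-- one fold over enumerate t carrying (prod, greatest, idx)
def zadanie_alt (t : List Int) : Option Int :=
  let st := (PySem.List.enumerate t 0).foldl (fun (st : Int × Int × Int) iv =>
    let st1 := if st.1 == iv.2 && iv.2 > st.2.1 then (st.1, iv.2, iv.1) else st
    if isPrimeB iv.2 then (st1.1 * iv.2, st1.2) else st1) (1, 0, 0)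
  if st.2.2 ≠ 0 then some st.2.2 else none

-- ===== PRECONDITION & SPEC =====
def Spec_zadanie (t : List Int) (out : Option Int) : Prop := out = zadanie_alt t
instance (t : List Int) (out : Option Int) : Decidable (Spec_zadanie t out) := by unfold Spec_zadanie; infer_instance

-- ===== CLAIM (what is proved, stated in full; the proofs are below) =====
def Claim_equal_zadanie : Prop := ∀ (t : List Int), Dom_zadanie t → Spec_zadanie t (zadanie t)

-- ===== LEMMAS AND PROOFS =====

-- the two primality tests agree: both try exactly the divisors 2 <= d with d*d <= n
theorem trialB_eq_all (n : Int) (hn : 1 < n) : ∀ (d : Nat),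
    trialB n d = (PySem.List.pyRange d ((Nat.sqrt n.toNat : Int) + 1) 1).all
      (fun i => !(PySem.Int.mod n i == 0)) := by
  intro d
  induction d using trialB.induct n with
  | case1 d h hm =>
    rw [trialB]
    have hd : d ≤ Nat.sqrt n.toNat := by
      rw [Nat.le_sqrt]
      have h2 : ((d * d : Nat) : Int) ≤ n := by push_cast; exact h
      omega
    rw [PySem.List.pyRange_one_cons (by exact_mod_cast by omega)]
    simp [h, hm]
  | case2 d h hm ih =>
    rw [trialB]
    have hd : d ≤ Nat.sqrt n.toNat := by
      rw [Nat.le_sqrt]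
      have h2 : ((d * d : Nat) : Int) ≤ n := by push_cast; exact h
      omega
    rw [PySem.List.pyRange_one_cons (by exact_mod_cast by omega)]
    simp only [h, dif_pos, if_neg hm, List.all_cons, ih]
    simp [hm]
  | case3 d h =>
    rw [trialB]
    have hd : ¬ d ≤ Nat.sqrt n.toNat := by
      rw [Nat.le_sqrt]
      intro hc
      apply h
      have h2 : ((d * d : Nat) : Int) ≤ n := by omega
      push_cast at h2
      exact h2
    rw [PySem.List.pyRange_one_eq_nil (by exact_mod_cast by omega)]
    simp [h]

theorem isPrime_eq (n : Int) : isPrimeB n = isPrimeA n := by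
  unfold isPrimeB isPrimeA
  by_cases hn : n ≤ 1
  · simp [hn]
  · simp only [if_neg hn]
    exact trialB_eq_all n (by omega) 2

-- the prime product of a list, as B's fold computes it
def prodP (l : List Int) : Int :=
  l.foldl (fun p x => if isPrimeA x then p * x else p) 1

-- A's inner loop over range(i) computes prodP of the first i elements
theorem inner_eq_prodP (t : List Int) (i : Nat) (hi : i ≤ t.length) :
    (PySem.List.pyRange 0 (i : Int) 1).foldl (fun p j =>
      if isPrimeA (PySem.List.pyGetD t j 0) then p * PySem.List.pyGetD t j 0 else p) 1
    = prodP (t.take i) := by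
  have hcongr : (PySem.List.pyRange 0 (i : Int) 1).foldl (fun p j =>
      if isPrimeA (PySem.List.pyGetD t j 0) then p * PySem.List.pyGetD t j 0 else p) 1
    = (PySem.List.pyRange 0 (i : Int) 1).foldl (fun p j =>
      if isPrimeA (PySem.List.pyGetD (t.take i) j 0) then p * PySem.List.pyGetD (t.take i) j 0 else p) 1 := by
    apply PySem.List.foldl_congr_mem
    intro acc x hx
    rw [PySem.List.mem_pyRange_one] at hx
    have h0 : PySem.List.pyGetD (t.take i) x 0 = PySem.List.pyGetD t x 0 := by
      rw [PySem.List.pyGetD_eq_getElem _ _ hx.1 (by simp; omega),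
          PySem.List.pyGetD_eq_getElem _ _ hx.1 (by omega)]
      rw [List.getElem_take]
    rw [h0]
  rw [hcongr]
  have hlen : ((t.take i).length : Int) = (i : Int) := by simp [Nat.min_eq_left hi]
  unfold prodP
  rw [← hlen]
  exact PySem.List.foldl_pyRange_zero_pyGetD' (t.take i) 0
    (fun p x => if isPrimeA x then p * x else p) 1

-- prodP over a snoc
theorem prodP_append (l : List Int) (v : Int) :
    prodP (l ++ [v]) = if isPrimeA v then prodP l * v else prodP l := by
  unfold prodP
  rw [List.foldl_append]
  simp

-- A's outer step and B's step, named so the invariant proof can keep the folds folded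
def stepA (t : List Int) (st : Int × Int) (i : Int) : Int × Int :=
  let iloczyn := (PySem.List.pyRange 0 i 1).foldl (fun p j =>
    if isPrimeA (PySem.List.pyGetD t j 0) then p * PySem.List.pyGetD t j 0 else p) 1
  let ti := PySem.List.pyGetD t i 0
  if iloczyn == ti then (if ti > st.1 then (ti, i) else st) else st

def stepB (st : Int × Int × Int) (iv : Int × Int) : Int × Int × Int :=
  let st1 := if st.1 == iv.2 && iv.2 > st.2.1 then (st.1, iv.2, iv.1) else st
  if isPrimeB iv.2 then (st1.1 * iv.2, st1.2) else st1

-- one synchronized step: B's step on (prefix product, A-state) mirrors A's step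
theorem step_pair (t : List Int) (k : Nat) (hk : k < t.length) (st : Int × Int) :
    stepB (prodP (t.take k), st) ((k : Int), t[k])
    = (prodP (t.take (k + 1)), stepA t st (k : Int)) := by
  have hti : PySem.List.pyGetD t (k : Int) 0 = t[k] := by
    rw [PySem.List.pyGetD_eq_getElem _ _ (by exact_mod_cast Nat.zero_le k) (by exact_mod_cast hk)]
    simp
  have htake : t.take (k + 1) = t.take k ++ [t[k]] := by
    rw [List.take_add_one]
    simp [List.getElem?_eq_getElem hk]
  unfold stepA stepB
  simp only [inner_eq_prodP t k (le_of_lt hk), hti, htake, prodP_append, isPrime_eq]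
  by_cases hm : prodP (t.take k) = t[k] <;> by_cases hg : t[k] > st.1 <;>
    by_cases hp : isPrimeA t[k] <;>
      simp [hm, hg, hp]

-- main invariant: after the first k elements, B's state is (prefix prime product, A's state)
theorem fold_invariant (t : List Int) : ∀ (k : Nat), k ≤ t.length →
    (PySem.List.enumerate (t.take k) 0).foldl stepB (1, 0, 0)
    = (prodP (t.take k),
       (PySem.List.pyRange 0 (k : Int) 1).foldl (stepA t) (0, 0)) := by
  intro k
  induction k with
  | zero =>
    intro _
    simp only [List.take_zero, PySem.List.enumerate_nil, List.foldl_nil, Nat.cast_zero]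
    rw [PySem.List.pyRange_one_eq_nil (le_refl 0)]
    simp [prodP]
  | succ k ih =>
    intro hk
    have hk' : k ≤ t.length := by omega
    have hkl : k < t.length := by omega
    have htake : t.take (k + 1) = t.take k ++ [t[k]] := by
      rw [List.take_add_one]
      simp [List.getElem?_eq_getElem hkl]
    have henum : PySem.List.enumerate (t.take (k + 1)) 0
        = PySem.List.enumerate (t.take k) 0 ++ [((k : Int), t[k])] := by
      rw [htake, PySem.List.enumerate_append]
      simp [Nat.min_eq_left hk']
    have hrange : PySem.List.pyRange 0 ((k + 1 : Nat) : Int) 1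
        = PySem.List.pyRange 0 (k : Int) 1 ++ [(k : Int)] := by
      push_cast
      exact PySem.List.pyRange_one_succ_right (by exact_mod_cast Nat.zero_le k)
    rw [henum, hrange, List.foldl_append, List.foldl_append, ih hk']
    simp only [List.foldl_cons, List.foldl_nil]
    exact step_pair t k hkl _

-- ===== VERDICT (by name: the statement is the Claim_ definition above) =====
theorem zadanie_spec : Claim_equal_zadanie := by
  intro t _
  unfold Spec_zadanie zadanie zadanie_alt
  have h := fold_invariant t t.length (le_refl _)
  rw [List.take_length] at h
  show (if ((PySem.List.pyRange 0 (t.length : Int) 1).foldl (stepA t) (0, 0)).2 ≠ 0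
        then some ((PySem.List.pyRange 0 (t.length : Int) 1).foldl (stepA t) (0, 0)).2 else none)
     = (if ((PySem.List.enumerate t 0).foldl stepB (1, 0, 0)).2.2 ≠ 0
        then some ((PySem.List.enumerate t 0).foldl stepB (1, 0, 0)).2.2 else none)
  rw [h]
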